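-- pv_equiv track=rewrite | github.com/chiseungii/Algorithm_Study | BOJ/#1065 한수/한수.py | isProg
-- ===== SOURCE A (Python) =====
-- def isProg(n):
--     if n < 100: return True
--
--     last = n%10
--     n //= 10
--     sub = last-n%10
--
--     while n >= 10:
--         last = n%10
--         n //= 10
--
--         if last-n%10 != sub: return False
--
--     return True
-- ===== SOURCE B (Python) =====
-- def isProg(n):
--     if n < 100: return True
--     return n % 10 - n // 10 % 10 == n // 10 % 10 - n // 100 % 10 and isProg(n // 10)
-- ===== Notes on version B (the rewrite author's own statement) =====
-- stated objective: simpler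
-- what changed: A iterates a while loop carrying the first digit difference 'sub' and compares every later difference against it; B stores no difference at all: it recursively checks that the second difference of the bottom three digits is zero and recurses on n//10 (all differences equal iff adjacent differences are pairwise equal).
import Mathlib
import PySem

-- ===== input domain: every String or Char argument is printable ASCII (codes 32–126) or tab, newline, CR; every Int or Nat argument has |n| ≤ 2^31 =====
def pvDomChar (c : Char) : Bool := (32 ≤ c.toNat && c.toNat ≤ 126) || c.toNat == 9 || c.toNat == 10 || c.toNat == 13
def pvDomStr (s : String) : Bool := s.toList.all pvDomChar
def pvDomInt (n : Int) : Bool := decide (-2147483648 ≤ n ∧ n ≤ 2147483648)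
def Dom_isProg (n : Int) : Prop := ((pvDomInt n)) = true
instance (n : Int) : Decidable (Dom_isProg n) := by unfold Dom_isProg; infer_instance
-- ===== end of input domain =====

-- B keeps no stored first difference: it recursively checks that the second difference
-- of the bottom three digits is zero and recurses on n//10 (objective: simpler).

-- ===== PORT A =====
-- A's 'while n >= 10' loop, carrying the fixed difference 'sub';
-- 'last = n%10; n //= 10; if last - n%10 != sub: return False' inlined in the same order
def isProgLoop (n sub : Int) : Bool :=
  if _h : 10 ≤ n then
    if PySem.Int.mod n 10 - PySem.Int.mod (PySem.Int.floordiv n 10) 10 ≠ sub then false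
    else isProgLoop (PySem.Int.floordiv n 10) sub
  else true
termination_by n.toNat
decreasing_by
  rw [PySem.Int.floordiv_eq_ediv_of_pos (by norm_num : (0:Int) < 10)]
  omega

def isProg (n : Int) : Bool :=
  if n < 100 then true
  else
    let last := PySem.Int.mod n 10
    let n1 := PySem.Int.floordiv n 10
    let sub := last - PySem.Int.mod n1 10
    isProgLoop n1 sub

-- ===== PORT B =====
-- 'return n%10 - n//10%10 == n//10%10 - n//100%10 and isProg(n//10)'
def isProg_alt (n : Int) : Bool :=
  if n < 100 then true
  else
    (decide (PySem.Int.mod n 10 - PySem.Int.mod (PySem.Int.floordiv n 10) 10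
        = PySem.Int.mod (PySem.Int.floordiv n 10) 10 - PySem.Int.mod (PySem.Int.floordiv n 100) 10))
      && isProg_alt (PySem.Int.floordiv n 10)
termination_by n.toNat
decreasing_by
  rw [PySem.Int.floordiv_eq_ediv_of_pos (by norm_num : (0:Int) < 10)]
  omega

-- ===== PRECONDITION & SPEC =====
def Spec_isProg (n : Int) (out : Bool) : Prop := out = isProg_alt n
instance (n : Int) (out : Bool) : Decidable (Spec_isProg n out) := by unfold Spec_isProg; infer_instance

-- ===== CLAIM (what is proved, stated in full; the proofs are below) =====
def Claim_equal_isProg : Prop := ∀ (n : Int), Dom_isProg n → Spec_isProg n (isProg n)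

-- ===== LEMMAS AND PROOFS =====

-- the first digit difference of m
def d0 (m : Int) : Int := PySem.Int.mod m 10 - PySem.Int.mod (PySem.Int.floordiv m 10) 10

lemma floordiv_ten (m : Int) : PySem.Int.floordiv m 10 = m / 10 :=
  PySem.Int.floordiv_eq_ediv_of_pos (by norm_num)

lemma floordiv_hundred (m : Int) :
    PySem.Int.floordiv (PySem.Int.floordiv m 10) 10 = PySem.Int.floordiv m 100 := by
  rw [floordiv_ten, floordiv_ten, PySem.Int.floordiv_eq_ediv_of_pos (by norm_num : (0:Int) < 100)]
  omega

-- A's loop compares against its fixed 'sub' only at the head; afterwards the fixed value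
-- may be replaced by the head difference itself
lemma loop_step (m sub : Int) (h : 10 ≤ m) :
    isProgLoop m sub = ((decide (d0 m = sub)) && isProgLoop (PySem.Int.floordiv m 10) (d0 m)) := by
  rw [isProgLoop, dif_pos h]
  by_cases heq : d0 m = sub
  · rw [if_neg (by simpa [d0] using heq), heq]
    simp
  · rw [if_pos (by simpa [d0] using heq)]
    simp [heq]

lemma loop_trivial (m sub : Int) (h : ¬ 10 ≤ m) : isProgLoop m sub = true := by
  rw [isProgLoop, dif_neg h]

-- B's recursive call, rewritten through d0 and floordiv composition
lemma alt_unfold (n : Int) (h : ¬ n < 100) :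
    isProg_alt n = ((decide (d0 n = d0 (PySem.Int.floordiv n 10)))
      && isProg_alt (PySem.Int.floordiv n 10)) := by
  rw [isProg_alt, if_neg h, d0, d0, floordiv_hundred]

-- the key bridge: A's loop started at n//10 with sub = d0 n equals B's recursion at n
lemma loop_eq_alt (n : Int) (h : ¬ n < 100) :
    isProgLoop (PySem.Int.floordiv n 10) (d0 n) = isProg_alt n := by
  have hten : (10:Int) ≤ PySem.Int.floordiv n 10 := by rw [floordiv_ten]; omega
  rw [alt_unfold n h, loop_step _ _ hten]
  by_cases h2 : (PySem.Int.floordiv n 10) < 100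
  · -- recursion bottoms out: n//100 < 10, so both tails are true
    have hsmall : ¬ (10:Int) ≤ PySem.Int.floordiv (PySem.Int.floordiv n 10) 10 := by
      rw [floordiv_ten, floordiv_ten] at *
      omega
    rw [loop_trivial _ _ hsmall, isProg_alt, if_pos h2]
    simp [eq_comm]
  · rw [loop_eq_alt (PySem.Int.floordiv n 10) h2]
    simp [eq_comm]
termination_by n.toNat
decreasing_by
  rw [floordiv_ten] at *
  omega

-- ===== VERDICT (by name: the statement is the Claim_ definition above) =====
theorem isProg_spec : Claim_equal_isProg := by
  unfold Claim_equal_isProg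
  intro n _
  unfold Spec_isProg isProg
  by_cases h : n < 100
  · rw [if_pos h, isProg_alt, if_pos h]
  · rw [if_neg h]
    exact loop_eq_alt n h
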